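-- pv_equiv track=rewrite | github.com/lvalentine6/algorithm_python | programmers/lv3/132266.py | solution
-- ===== SOURCE A (Python) =====
-- from collections import deque
--
-- def solution(n, roads, sources, destination):
--     answer = []
--
--     lst = [[] for _ in range(n)]
--     result = [-1 for _ in range(n)]
--
--     for r in roads:
--         lst[r[0] - 1].append(r[1] - 1)
--         lst[r[1] - 1].append(r[0] - 1)
--
--     queue = deque()
--     queue.append(destination - 1)
--     result[destination - 1] = 0
--
--     while queue:
--         position = queue.popleft()
--
--         route = lst[position]
--
--         for i in route:
--             if result[i] == -1:
--                 queue.append(i)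
--                 result[i] = result[position] + 1
--
--     for s in sources:
--         answer.append(result[s - 1])
--
--     return answer
-- ===== SOURCE B (Python) =====
-- def solution(n, roads, sources, destination):
--     # fixpoint (Jacobi) relaxation instead of a BFS queue: repeatedly recompute the whole
--     # distance array from the previous one until it stops changing
--     adj = [[] for _ in range(n)]
--     for r in roads:
--         adj[r[0] - 1].append(r[1] - 1)
--         adj[r[1] - 1].append(r[0] - 1)
--
--     dist = [-1] * n
--     dist[destination - 1] = 0
--
--     while True:
--         new = []
--         for v in range(n):
--             if dist[v] != -1:
--                 new.append(dist[v])
--             else: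
--                 best = -1
--                 for u in adj[v]:
--                     if dist[u] != -1 and (best == -1 or dist[u] < best):
--                         best = dist[u]
--                 new.append(best + 1 if best != -1 else -1)
--         if new == dist:
--             break
--         dist = new
--     return [dist[s - 1] for s in sources]
-- ===== Notes on version B (the rewrite author's own statement) =====
-- stated objective: alternative
-- what changed: Replaces the deque-driven BFS (popping one node at a time, assigning result[parent]+1) with Jacobi fixpoint relaxation: the whole distance array is repeatedly recomputed from the previous one (each unset node takes min set-neighbour distance + 1) until it stops changing; no queue or frontier is kept.
import Mathlib
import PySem

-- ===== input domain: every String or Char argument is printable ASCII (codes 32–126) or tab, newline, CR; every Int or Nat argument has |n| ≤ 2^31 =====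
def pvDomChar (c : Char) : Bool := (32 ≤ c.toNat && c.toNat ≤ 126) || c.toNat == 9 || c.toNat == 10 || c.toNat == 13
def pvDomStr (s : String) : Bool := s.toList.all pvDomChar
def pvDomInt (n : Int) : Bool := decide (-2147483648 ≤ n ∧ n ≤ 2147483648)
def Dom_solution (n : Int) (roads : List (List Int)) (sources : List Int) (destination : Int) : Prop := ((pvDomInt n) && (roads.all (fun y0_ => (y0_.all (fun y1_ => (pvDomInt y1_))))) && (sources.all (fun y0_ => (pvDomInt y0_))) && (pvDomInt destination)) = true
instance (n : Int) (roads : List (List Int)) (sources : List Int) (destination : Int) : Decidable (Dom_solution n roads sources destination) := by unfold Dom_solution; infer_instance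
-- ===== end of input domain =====

-- B replaces A's queue-driven BFS by Jacobi fixpoint relaxation: the whole distance array is
-- recomputed from the previous one (each unset node takes min set-neighbour + 1) until it stops
-- changing.  Equal return values are proved on Pre_ (exactly the inputs where A raises no IndexError).

-- ===== PORT A =====
-- lst = [[] for _ in range(n)]; for r in roads: lst[r[0]-1].append(r[1]-1); lst[r[1]-1].append(r[0]-1)
-- (identical adjacency-building loop in A and in B, hence one shared helper)
def mkAdj (n : Int) (roads : List (List Int)) : List (List Int) :=
  roads.foldl (fun lst r =>
    let a := PySem.List.pyGetD r 0 0
    let b := PySem.List.pyGetD r 1 0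
    let lst1 := PySem.List.pySetD lst (a - 1) (PySem.List.pyGetD lst (a - 1) [] ++ [b - 1])
    PySem.List.pySetD lst1 (b - 1) (PySem.List.pyGetD lst1 (b - 1) [] ++ [a - 1]))
    ((PySem.List.pyRange 0 n 1).map (fun _ => ([] : List Int)))

-- result = [-1 for _ in range(n)]  (same line in both programs)
def initDist (n : Int) : List Int := (PySem.List.pyRange 0 n 1).map (fun _ => (-1 : Int))

-- body of A's inner 'for i in route: if result[i] == -1: queue.append(i); result[i] = result[position] + 1'
def visitA (position : Int) (acc : List Int × List Int) (i : Int) : List Int × List Int :=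
  if PySem.List.pyGetD acc.2 i 0 = -1 then
    (acc.1 ++ [i], PySem.List.pySetD acc.2 i (PySem.List.pyGetD acc.2 position 0 + 1))
  else acc

-- 'while queue: position = queue.popleft(); …'.  The while loop is ported with fuel; the loop pops
-- one node per iteration and every node is enqueued at most once (enqueue only on result[i] == -1,
-- which the write immediately destroys), so fuel n.toNat + 1 is never exhausted — proved below.
def bfsA (lst : List (List Int)) : Nat → List Int → List Int → List Int
  | 0, _, result => result
  | fuel + 1, queue, result =>
    match queue with
    | [] => result
    | position :: qs =>
      let st := (PySem.List.pyGetD lst position []).foldl (visitA position) (qs, result)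
      bfsA lst fuel st.1 st.2

def solution (n : Int) (roads : List (List Int)) (sources : List Int) (destination : Int) : List Int :=
  let lst := mkAdj n roads
  let result0 := PySem.List.pySetD (initDist n) (destination - 1) 0
  let result := bfsA lst (n.toNat + 1) [destination - 1] result0
  sources.foldl (fun answer s => answer ++ [PySem.List.pyGetD result (s - 1) 0]) []

-- ===== PORT B =====
-- number of -1 cells; the termination measure of B's fixpoint loop (cited in decreasing_by)
def countNeg (xs : List Int) : Nat := xs.countP (fun x => x = -1)

-- B's inner loop: 'best = -1; for u in adj[v]: if dist[u] != -1 and (best == -1 or dist[u] < best): best = dist[u]'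
def bestOf (dist : List Int) (row : List Int) : Int :=
  row.foldl (fun best u =>
    if PySem.List.pyGetD dist u 0 ≠ -1 ∧ (best = -1 ∨ PySem.List.pyGetD dist u 0 < best)
    then PySem.List.pyGetD dist u 0 else best) (-1)

-- one loop body of B's sweep over v (the if/else that decides what is appended to new)
def newCell (adj : List (List Int)) (dist : List Int) (v : Int) : Int :=
  if PySem.List.pyGetD dist v 0 ≠ -1 then PySem.List.pyGetD dist v 0
  else
    let best := bestOf dist (PySem.List.pyGetD adj v [])
    if best ≠ -1 then best + 1 else -1

-- 'new = []; for v in range(n): … new.append(…)'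
def sweepOnce (adj : List (List Int)) (n : Int) (dist : List Int) : List Int :=
  (PySem.List.pyRange 0 n 1).foldl (fun new v => new ++ [newCell adj dist v]) []

lemma sweepOnce_eq_map (adj : List (List Int)) (n : Int) (dist : List Int) :
    sweepOnce adj n dist = (PySem.List.pyRange 0 n 1).map (newCell adj dist) := by
  unfold sweepOnce
  rw [PySem.List.foldl_append_singleton_eq_map]
  rfl

lemma length_sweepOnce (adj : List (List Int)) (n : Int) (dist : List Int) :
    (sweepOnce adj n dist).length = (PySem.List.pyRange 0 n 1).length := by
  rw [sweepOnce_eq_map]; exact List.length_map ..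

-- a sweep result cell is the old cell, or turns a -1 cell into a non-(-1) value
lemma sweepOnce_pointwise (adj : List (List Int)) (n : Int) (dist : List Int)
    (_hlen : dist.length = (PySem.List.pyRange 0 n 1).length) (k : Nat)
    (hk : k < (PySem.List.pyRange 0 n 1).length) :
    (sweepOnce adj n dist).getD k 0 = dist.getD k 0 ∨
      (dist.getD k 0 = -1 ∧ (sweepOnce adj n dist).getD k 0 ≠ -1) := by
  rw [sweepOnce_eq_map]
  have hval : ((PySem.List.pyRange 0 n 1).map (newCell adj dist)).getD k 0
      = newCell adj dist ((PySem.List.pyRange 0 n 1)[k]) := by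
    rw [List.getD_eq_getElem?_getD, List.getElem?_map, List.getElem?_eq_getElem hk]
    rfl
  rw [hval, PySem.List.getElem_pyRange_one, zero_add]
  have hcast : (PySem.List.pyRange 0 n 1)[k] = ((k : Int)) := by
    rw [PySem.List.getElem_pyRange_one, zero_add]
  have hread : PySem.List.pyGetD dist ((k : Int)) 0 = dist.getD k 0 :=
    PySem.List.pyGetD_natCast ..
  unfold newCell
  rw [hread]
  by_cases hset : dist.getD k 0 = -1
  · rw [if_neg (by simpa using hset)]
    by_cases hb : bestOf dist (PySem.List.pyGetD adj (k : Int) []) ≠ -1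
    · rw [if_pos hb]
      by_cases hv : bestOf dist (PySem.List.pyGetD adj (k : Int) []) + 1 = -1
      · left; rw [hv, hset]
      · right; exact ⟨hset, hv⟩
    · rw [if_neg hb]; left; rw [hset]
  · rw [if_pos hset]; left; rfl

-- strict decrease of countNeg for any pointwise "-1 flips or stays" update
lemma countNeg_lt_of_pointwise : ∀ (xs ys : List Int), xs.length = ys.length →
    (∀ k, k < xs.length →
      ys.getD k 0 = xs.getD k 0 ∨ (xs.getD k 0 = -1 ∧ ys.getD k 0 ≠ -1)) →
    ys ≠ xs → countNeg ys < countNeg xs := by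
  intro xs
  induction xs with
  | nil => intro ys h _ hne; cases ys <;> simp_all
  | cons x xt ih =>
    intro ys hlen hpt hne
    cases ys with
    | nil => simp at hlen
    | cons y yt =>
      have h0 := hpt 0 (by simp)
      simp only [List.getD_cons_zero] at h0
      have htail : ∀ k, k < xt.length →
          yt.getD k 0 = xt.getD k 0 ∨ (xt.getD k 0 = -1 ∧ yt.getD k 0 ≠ -1) := by
        intro k hk
        have := hpt (k + 1) (by simp; omega)
        simpa using this
      have hlen' : xt.length = yt.length := by simpa using hlen
      unfold countNeg
      simp only [List.countP_cons]
      by_cases hht : y = x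
      · subst hht
        have hne' : yt ≠ xt := by intro h; exact hne (by rw [h])
        have := ih yt hlen' htail hne'
        unfold countNeg at this
        omega
      · rcases h0 with h0 | ⟨hx, hy⟩
        · exact absurd h0 hht
        · have hle : countNeg yt ≤ countNeg xt := by
            by_cases ht : yt = xt
            · rw [ht]
            · exact Nat.le_of_lt (ih yt hlen' htail ht)
          unfold countNeg at hle
          rw [if_neg (by simpa using hy), if_pos (by simp [hx])]
          omega

-- 'while True: new = …; if new == dist: break; dist = new' — terminates because each productive
-- sweep only turns -1 cells into non-(-1) values (countNeg strictly decreases once the array has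
-- the sweep's length, which the first iteration establishes)
def sweepLoop (adj : List (List Int)) (n : Int) (dist : List Int) : List Int :=
  let new := sweepOnce adj n dist
  if new = dist then dist else sweepLoop adj n new
termination_by countNeg dist +
  (if dist.length = (PySem.List.pyRange 0 n 1).length then 0
   else (PySem.List.pyRange 0 n 1).length + 1)
decreasing_by
  have hlnew := length_sweepOnce adj n dist
  by_cases hd : dist.length = (PySem.List.pyRange 0 n 1).length
  · have hlt : countNeg (sweepOnce adj n dist) < countNeg dist := by
      apply countNeg_lt_of_pointwise dist (sweepOnce adj n dist) (by omega)
        (fun k hk => sweepOnce_pointwise adj n dist hd k (by omega))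
      assumption
    rw [if_pos hd, if_pos (by omega)]
    omega
  · have hcle : countNeg (sweepOnce adj n dist) ≤ (PySem.List.pyRange 0 n 1).length := by
      have := List.countP_le_length (l := sweepOnce adj n dist) (p := fun x => decide (x = -1))
      unfold countNeg
      omega
    rw [if_neg hd, if_pos (by omega)]
    omega

def solution_alt (n : Int) (roads : List (List Int)) (sources : List Int) (destination : Int) : List Int :=
  let adj := mkAdj n roads
  let dist0 := PySem.List.pySetD (initDist n) (destination - 1) 0
  let dist := sweepLoop adj n dist0
  sources.map (fun s => PySem.List.pyGetD dist (s - 1) 0)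

-- ===== PRECONDITION & SPEC =====
-- Pre_ is exactly the set of inputs on which the Python A returns (no IndexError): every road has
-- ≥ 2 entries and both endpoints index a length-n list (Python negative indices allowed), and so do
-- destination and every source.
def Pre_solution (n : Int) (roads : List (List Int)) (sources : List Int) (destination : Int) : Prop :=
  1 ≤ n ∧
  (∀ r ∈ roads, 2 ≤ r.length ∧ PySem.Raise.InRange n.toNat (r.getD 0 0 - 1) ∧
      PySem.Raise.InRange n.toNat (r.getD 1 0 - 1)) ∧
  PySem.Raise.InRange n.toNat (destination - 1) ∧
  (∀ s ∈ sources, PySem.Raise.InRange n.toNat (s - 1))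
instance (n : Int) (roads : List (List Int)) (sources : List Int) (destination : Int) : Decidable (Pre_solution n roads sources destination) := by unfold Pre_solution; infer_instance

def pvWitness_solution : Int × List (List Int) × List Int × Int := (3, [[1, 2], [2, 3]], [1, 3], 2)

def Spec_solution (n : Int) (roads : List (List Int)) (sources : List Int) (destination : Int) (out : List Int) : Prop := out = solution_alt n roads sources destination
instance (n : Int) (roads : List (List Int)) (sources : List Int) (destination : Int) (out : List Int) : Decidable (Spec_solution n roads sources destination out) := by unfold Spec_solution; infer_instance

-- ===== CLAIM (what is proved, stated in full; the proofs are below) =====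
def Claim_equal_solution : Prop := ∀ (n : Int) (roads : List (List Int)) (sources : List Int) (destination : Int), Dom_solution n roads sources destination → Pre_solution n roads sources destination → Spec_solution n roads sources destination (solution n roads sources destination)

-- ===== LEMMAS AND PROOFS =====

lemma pyIdx_lt {m : Nat} {i : Int} {k : Nat} (h : PySem.List.pyIdx? m i = some k) : k < m := by
  unfold PySem.List.pyIdx? at h
  split_ifs at h <;> simp_all <;> omega

lemma pyIdx_some_of_inRange {m : Nat} {i : Int} (h : PySem.Raise.InRange m i) :
    ∃ k, PySem.List.pyIdx? m i = some k ∧ k < m := by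
  obtain ⟨h1, h2⟩ := h
  unfold PySem.List.pyIdx?
  by_cases ha : 0 ≤ i
  · rw [if_pos ha, if_pos h2]
    exact ⟨i.toNat, rfl, by omega⟩
  · rw [if_neg ha, if_pos h1]
    exact ⟨m - (-i).toNat, rfl, by omega⟩

lemma read_neg_one {xs : List Int} {i : Int} (h : PySem.List.pyGetD xs i 0 = -1) :
    ∃ k, PySem.List.pyIdx? xs.length i = some k ∧ ∃ hk : k < xs.length, xs[k] = -1 := by
  unfold PySem.List.pyGetD PySem.List.pyGet? at h
  cases hk : PySem.List.pyIdx? xs.length i with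
  | none => rw [hk] at h; simp at h
  | some k =>
    rw [hk] at h
    have hklt := pyIdx_lt hk
    refine ⟨k, rfl, hklt, ?_⟩
    simp only [Option.bind_some] at h
    rw [List.getElem?_eq_getElem hklt] at h
    simpa using h

lemma pySetD_eq_set {α : Type} {xs : List α} {i : Int} {k : Nat} (v : α)
    (h : PySem.List.pyIdx? xs.length i = some k) :
    PySem.List.pySetD xs i v = xs.set k v := by
  unfold PySem.List.pySetD PySem.List.pySet?
  rw [h]
  rfl

lemma pyGetD_cell {α : Type} (xs : List α) (i : Int) (k : Nat) (d : α)
    (h : PySem.List.pyIdx? xs.length i = some k) :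
    PySem.List.pyGetD xs i d = xs.getD k d := by
  simp only [PySem.List.pyGetD, PySem.List.pyGet?, h, Option.bind_some, List.getD_eq_getElem?_getD]

lemma getD_set_of {α : Type} (xs : List α) (k : Nat) (v : α) (c : Nat) (d : α)
    (h : k < xs.length) :
    (xs.set k v).getD c d = if c = k then v else xs.getD c d := by
  simp only [List.getD, List.getElem?_set]
  by_cases hc : c = k
  · simp [hc, h]
  · simp [hc, Ne.symm hc]

lemma countNeg_pySetD (xs : List Int) (i v : Int) (h : PySem.List.pyGetD xs i 0 = -1)
    (hv : v ≠ -1) : countNeg (PySem.List.pySetD xs i v) + 1 = countNeg xs := by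
  obtain ⟨k, hk, hklt, hxk⟩ := read_neg_one h
  rw [pySetD_eq_set v hk]
  unfold countNeg
  rw [List.countP_set hklt]
  have h3 : 0 < xs.countP (fun x => decide (x = -1)) :=
    List.countP_pos_iff.mpr ⟨xs[k], List.getElem_mem hklt, by simp [hxk]⟩
  simp only [hxk, decide_true, if_true, decide_eq_true_eq, if_neg hv]
  omega

-- a -1 read pins a real in-range cell; writing there leaves other non-(-1) cells unchanged
lemma pyGetD_pySetD_other {xs : List Int} {i j : Int} (v d : Int)
    (hi : PySem.List.pyGetD xs i 0 = -1) (hj : PySem.List.pyGetD xs j 0 ≠ -1) :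
    PySem.List.pyGetD (PySem.List.pySetD xs i v) j d = PySem.List.pyGetD xs j d := by
  obtain ⟨k, hk, hklt, hxk⟩ := read_neg_one hi
  rw [pySetD_eq_set v hk]
  unfold PySem.List.pyGetD PySem.List.pyGet? at hj ⊢
  rw [List.length_set]
  cases hm : PySem.List.pyIdx? xs.length j with
  | none => rw [hm] at hj; simp at hj ⊢
  | some m =>
    rw [hm] at hj
    simp only [Option.bind_some] at hj ⊢
    rw [List.getElem?_set]
    by_cases hkm : k = m
    · subst hkm
      rw [List.getElem?_eq_getElem hklt, hxk] at hj
      simp at hj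
    · simp [hkm]

lemma pyGetD_pySetD_self {xs : List Int} {i : Int} (v d : Int)
    (hi : PySem.List.pyGetD xs i 0 = -1) :
    PySem.List.pyGetD (PySem.List.pySetD xs i v) i d = v := by
  obtain ⟨k, hk, hklt, hxk⟩ := read_neg_one hi
  rw [pySetD_eq_set v hk]
  unfold PySem.List.pyGetD PySem.List.pyGet?
  rw [List.length_set, hk]
  simp only [Option.bind_some]
  simp [hklt]

lemma mem_pySetD {xs : List Int} {i : Int} {v x : Int} (h : x ∈ PySem.List.pySetD xs i v) :
    x ∈ xs ∨ x = v := by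
  unfold PySem.List.pySetD PySem.List.pySet? at h
  cases hk : PySem.List.pyIdx? xs.length i with
  | none => rw [hk] at h; simp at h; exact Or.inl h
  | some k =>
    rw [hk] at h
    simp only [Option.map_some, Option.getD_some] at h
    exact List.mem_or_eq_of_mem_set h

-- ---- the level-synchronous BFS used as the midpoint of the proof:
-- A's queue loop is bridged to it level by level, and B's sweeps are bridged to it sweep by sweep.
def levelStepInner (level : Nat) (acc : List Int × List Int) (nb : Int) : List Int × List Int :=
  if PySem.List.pyGetD acc.1 nb 0 = -1 then
    (PySem.List.pySetD acc.1 nb ((level : Int) + 1), acc.2 ++ [nb])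
  else acc

def levelStep (lst : List (List Int)) (level : Nat) (acc : List Int × List Int) (node : Int) : List Int × List Int :=
  (PySem.List.pyGetD lst node []).foldl (levelStepInner level) acc

lemma countNeg_inner_foldl (route : List Int) (level : Nat) (acc : List Int × List Int) :
    countNeg (route.foldl (levelStepInner level) acc).1 + (route.foldl (levelStepInner level) acc).2.length
      = countNeg acc.1 + acc.2.length := by
  induction route generalizing acc with
  | nil => rfl
  | cons nb rest ih =>
    rw [List.foldl_cons]
    rw [ih]
    unfold levelStepInner
    by_cases h : PySem.List.pyGetD acc.1 nb 0 = -1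
    · rw [if_pos h]
      have hv : ((level : Int) + 1) ≠ -1 := by omega
      have := countNeg_pySetD acc.1 nb ((level : Int) + 1) h hv
      simp only [List.length_append, List.length_cons, List.length_nil]
      omega
    · rw [if_neg h]

lemma countNeg_levelStep_foldl (front : List Int) (lst : List (List Int)) (level : Nat)
    (acc : List Int × List Int) :
    countNeg (front.foldl (levelStep lst level) acc).1 + (front.foldl (levelStep lst level) acc).2.length
      = countNeg acc.1 + acc.2.length := by
  induction front generalizing acc with
  | nil => rfl
  | cons node rest ih =>
    rw [List.foldl_cons, ih]
    unfold levelStep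
    exact countNeg_inner_foldl _ _ _

def bfsB (lst : List (List Int)) (frontier : List Int) (level : Nat) (dist : List Int) : List Int :=
  match frontier with
  | [] => dist
  | x :: xs =>
    let st := (x :: xs).foldl (levelStep lst level) (dist, [])
    bfsB lst st.2 (level + 1) st.1
termination_by (countNeg dist, frontier.length)
decreasing_by
  have h := countNeg_levelStep_foldl (x :: xs) lst level (dist, [])
  simp only [List.length_nil, Nat.add_zero] at h
  rcases Nat.lt_or_ge (countNeg ((x :: xs).foldl (levelStep lst level) (dist, [])).1)
      (countNeg dist) with hlt | hge
  · exact Prod.Lex.left _ _ hlt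
  · have h1 : countNeg ((x :: xs).foldl (levelStep lst level) (dist, [])).1 = countNeg dist := by
      omega
    rw [h1]
    exact Prod.Lex.right _ (by simp only [List.length_cons]; omega)

lemma bfsB_eq_rest (lst : List (List Int)) (front : List Int) (level : Nat) (dist : List Int) :
    bfsB lst front level dist
      = bfsB lst (front.foldl (levelStep lst level) (dist, [])).2 (level + 1)
          (front.foldl (levelStep lst level) (dist, [])).1 := by
  cases front with
  | nil => simp [bfsB]
  | cons x xs => conv_lhs => rw [bfsB]

-- ---- A = level-BFS: processing ONE node's adjacency row, A's fold over (queue-so-far, result)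
-- computes the same updates as level-BFS's fold over (dist, nxt)
lemma inner_eq (p : Int) (level : Nat) (route : List Int) :
    ∀ (res tail nx : List Int),
      (∀ x ∈ res, -1 ≤ x) →
      PySem.List.pyGetD res p 0 = (level : Int) →
      (∀ q ∈ nx, PySem.List.pyGetD res q 0 = (level : Int) + 1) →
      route.foldl (visitA p) (tail ++ nx, res)
          = (tail ++ (route.foldl (levelStepInner level) (res, nx)).2,
             (route.foldl (levelStepInner level) (res, nx)).1)
        ∧ (∀ x ∈ (route.foldl (levelStepInner level) (res, nx)).1, -1 ≤ x)
        ∧ (∀ j d, PySem.List.pyGetD res j 0 ≠ -1 →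
            PySem.List.pyGetD (route.foldl (levelStepInner level) (res, nx)).1 j d
              = PySem.List.pyGetD res j d)
        ∧ (∀ q ∈ (route.foldl (levelStepInner level) (res, nx)).2,
            PySem.List.pyGetD (route.foldl (levelStepInner level) (res, nx)).1 q 0 = (level : Int) + 1) := by
  induction route with
  | nil =>
    intro res tail nx hc hp hnx
    exact ⟨rfl, hc, fun j d _ => rfl, hnx⟩
  | cons nb rest ih =>
    intro res tail nx hc hp hnx
    have hlev : ((level : Int)) ≠ -1 := by omega
    by_cases h : PySem.List.pyGetD res nb 0 = -1
    · have hA : visitA p (tail ++ nx, res) nb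
          = (tail ++ (nx ++ [nb]), PySem.List.pySetD res nb ((level : Int) + 1)) := by
        unfold visitA
        rw [if_pos h, hp, List.append_assoc]
      have hB : levelStepInner level (res, nx) nb
          = (PySem.List.pySetD res nb ((level : Int) + 1), nx ++ [nb]) := by
        unfold levelStepInner
        rw [if_pos h]
      have hc' : ∀ x ∈ PySem.List.pySetD res nb ((level : Int) + 1), -1 ≤ x := by
        intro x hx
        rcases mem_pySetD hx with hx | hx
        · exact hc x hx
        · omega
      have hp' : PySem.List.pyGetD (PySem.List.pySetD res nb ((level : Int) + 1)) p 0
          = (level : Int) := by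
        rw [pyGetD_pySetD_other _ 0 h (by rw [hp]; exact hlev), hp]
      have hnx' : ∀ q ∈ nx ++ [nb],
          PySem.List.pyGetD (PySem.List.pySetD res nb ((level : Int) + 1)) q 0
            = (level : Int) + 1 := by
        intro q hq
        rcases List.mem_append.mp hq with hq | hq
        · rw [pyGetD_pySetD_other _ 0 h (by rw [hnx q hq]; omega), hnx q hq]
        · rw [List.mem_singleton.mp hq]
          exact pyGetD_pySetD_self _ 0 h
      obtain ⟨ih1, ih2, ih3, ih4⟩ :=
        ih (PySem.List.pySetD res nb ((level : Int) + 1)) tail (nx ++ [nb]) hc' hp' hnx'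
      rw [List.foldl_cons, List.foldl_cons, hA, hB]
      refine ⟨ih1, ih2, ?_, ih4⟩
      intro j d hj
      rw [ih3 j d (by rw [pyGetD_pySetD_other _ 0 h hj]; exact hj),
        pyGetD_pySetD_other _ d h hj]
    · have hA : visitA p (tail ++ nx, res) nb = (tail ++ nx, res) := by
        unfold visitA
        rw [if_neg h]
      have hB : levelStepInner level (res, nx) nb = (res, nx) := by
        unfold levelStepInner
        rw [if_neg h]
      rw [List.foldl_cons, List.foldl_cons, hA, hB]
      exact ih res tail nx hc hp hnx

-- one BFS level of A's queue loop = one outer iteration of level-BFS, then induction on fuel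
lemma bridge (lst : List (List Int)) :
    ∀ (fuel : Nat) (front nx res : List Int) (level : Nat),
      (∀ x ∈ res, -1 ≤ x) →
      (∀ q ∈ front, PySem.List.pyGetD res q 0 = (level : Int)) →
      (∀ q ∈ nx, PySem.List.pyGetD res q 0 = (level : Int) + 1) →
      countNeg res + front.length + nx.length < fuel →
      bfsA lst fuel (front ++ nx) res
        = bfsB lst (front.foldl (levelStep lst level) (res, nx)).2 (level + 1)
            (front.foldl (levelStep lst level) (res, nx)).1 := by
  intro fuel
  induction fuel with
  | zero =>
    intro front nx res level hc hf hn hfuel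
    omega
  | succ fuel ih =>
    have step : ∀ (p : Int) (fs nx res : List Int) (level : Nat),
        (∀ x ∈ res, -1 ≤ x) →
        (∀ q ∈ p :: fs, PySem.List.pyGetD res q 0 = (level : Int)) →
        (∀ q ∈ nx, PySem.List.pyGetD res q 0 = (level : Int) + 1) →
        countNeg res + (p :: fs).length + nx.length < fuel + 1 →
        bfsA lst (fuel + 1) ((p :: fs) ++ nx) res
          = bfsB lst ((p :: fs).foldl (levelStep lst level) (res, nx)).2 (level + 1)
              ((p :: fs).foldl (levelStep lst level) (res, nx)).1 := by
      intro p fs nx res level hc hf hn hfuel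
      have hp := hf p List.mem_cons_self
      obtain ⟨heq, hc', hpres, hnx'⟩ :=
        inner_eq p level (PySem.List.pyGetD lst p []) res fs nx hc hp hn
      have hcount := countNeg_inner_foldl (PySem.List.pyGetD lst p []) level (res, nx)
      have hbfsA : bfsA lst (fuel + 1) ((p :: fs) ++ nx) res
          = bfsA lst fuel
              (fs ++ ((PySem.List.pyGetD lst p []).foldl (levelStepInner level) (res, nx)).2)
              ((PySem.List.pyGetD lst p []).foldl (levelStepInner level) (res, nx)).1 := by
        show bfsA lst (fuel + 1) (p :: (fs ++ nx)) res = _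
        rw [bfsA, heq]
      rw [hbfsA]
      rw [ih fs ((PySem.List.pyGetD lst p []).foldl (levelStepInner level) (res, nx)).2
          ((PySem.List.pyGetD lst p []).foldl (levelStepInner level) (res, nx)).1 level hc'
          (fun q hq => by
            rw [hpres q 0 (by rw [hf q (List.mem_cons_of_mem _ hq)]; omega)]
            exact hf q (List.mem_cons_of_mem _ hq))
          hnx'
          (by
            dsimp only at hcount
            simp only [List.length_cons] at hfuel
            omega)]
      rfl
    intro front nx res level hc hf hn hfuel
    cases front with
    | cons p fs => exact step p fs nx res level hc hf hn hfuel
    | nil =>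
      cases nx with
      | nil => simp [bfsA, bfsB]
      | cons q ns =>
        have h2 := step q ns [] res (level + 1) hc
          (fun r hr => by push_cast; exact hn r hr)
          (fun r hr => by cases hr)
          (by simp only [List.length_cons, List.length_nil] at hfuel ⊢; omega)
        simp only [List.nil_append, List.append_nil] at h2 ⊢
        rw [h2]
        rw [← bfsB_eq_rest]
        rfl

lemma initDist_length (n : Int) : (initDist n).length = n.toNat := by
  simp [initDist, PySem.List.pyRange]
  omega

-- ---- adjacency invariants of mkAdj: cell-level symmetry and in-range values ----
def AdjRel (m : Nat) (adj : List (List Int)) (c1 c2 : Nat) : Prop :=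
  ∃ x ∈ adj.getD c1 [], PySem.List.pyIdx? m x = some c2

def AdjInv (m : Nat) (adj : List (List Int)) : Prop :=
  adj.length = m ∧
  (∀ c x, x ∈ adj.getD c [] → PySem.Raise.InRange m x) ∧
  (∀ c1 c2, AdjRel m adj c1 c2 → AdjRel m adj c2 c1)

-- one road appended: the rows change exactly by the two new entries
lemma step_row_mem (m : Nat) (adj : List (List Int)) (hlen : adj.length = m)
    (a b : Int) (ca cb : Nat)
    (hca : PySem.List.pyIdx? m a = some ca) (hcb : PySem.List.pyIdx? m b = some cb) :
    (PySem.List.pySetD (PySem.List.pySetD adj a (PySem.List.pyGetD adj a [] ++ [b])) b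
        (PySem.List.pyGetD (PySem.List.pySetD adj a (PySem.List.pyGetD adj a [] ++ [b])) b [] ++ [a])).length = m ∧
    ∀ c x, (x ∈ (PySem.List.pySetD (PySem.List.pySetD adj a (PySem.List.pyGetD adj a [] ++ [b])) b
        (PySem.List.pyGetD (PySem.List.pySetD adj a (PySem.List.pyGetD adj a [] ++ [b])) b [] ++ [a])).getD c []
      ↔ x ∈ adj.getD c [] ∨ (c = ca ∧ x = b) ∨ (c = cb ∧ x = a)) := by
  have hcam := pyIdx_lt hca
  have hcbm := pyIdx_lt hcb
  have hca' : PySem.List.pyIdx? adj.length a = some ca := by rw [hlen]; exact hca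
  have h1 : PySem.List.pySetD adj a (PySem.List.pyGetD adj a [] ++ [b])
      = adj.set ca (adj.getD ca [] ++ [b]) := by
    rw [pySetD_eq_set _ hca', pyGetD_cell adj a ca [] hca']
  have hlen1 : (adj.set ca (adj.getD ca [] ++ [b])).length = m := by
    rw [List.length_set]; exact hlen
  have hcb' : PySem.List.pyIdx? (adj.set ca (adj.getD ca [] ++ [b])).length b = some cb := by
    rw [hlen1]; exact hcb
  have h2 : PySem.List.pySetD (adj.set ca (adj.getD ca [] ++ [b])) b
        (PySem.List.pyGetD (adj.set ca (adj.getD ca [] ++ [b])) b [] ++ [a])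
      = (adj.set ca (adj.getD ca [] ++ [b])).set cb
        ((adj.set ca (adj.getD ca [] ++ [b])).getD cb [] ++ [a]) := by
    rw [pySetD_eq_set _ hcb', pyGetD_cell _ b cb [] hcb']
  rw [h1, h2]
  constructor
  · rw [List.length_set]; exact hlen1
  · intro c x
    rw [getD_set_of _ cb _ c [] (by omega), getD_set_of _ ca _ cb [] (by omega),
      getD_set_of _ ca _ c [] (by omega)]
    split_ifs <;> simp_all [List.mem_append]

lemma mkAdj_inv (n : Int) (roads : List (List Int)) (hn : 1 ≤ n)
    (hr : ∀ r ∈ roads, 2 ≤ r.length ∧ PySem.Raise.InRange n.toNat (r.getD 0 0 - 1) ∧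
        PySem.Raise.InRange n.toNat (r.getD 1 0 - 1)) :
    AdjInv n.toNat (mkAdj n roads) := by
  unfold mkAdj
  have hinit : AdjInv n.toNat ((PySem.List.pyRange 0 n 1).map (fun _ => ([] : List Int))) := by
    refine ⟨?_, ?_, ?_⟩
    · rw [List.length_map, PySem.List.length_pyRange_one]; omega
    · intro c x hx
      rw [List.getD_eq_getElem?_getD, List.getElem?_map] at hx
      cases h : (PySem.List.pyRange 0 n 1)[c]? <;> simp [h] at hx
    · intro c1 c2 h
      obtain ⟨x, hx, _⟩ := h
      rw [List.getD_eq_getElem?_getD, List.getElem?_map] at hx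
      cases h : (PySem.List.pyRange 0 n 1)[c1]? <;> simp [h] at hx
  generalize ((PySem.List.pyRange 0 n 1).map (fun _ => ([] : List Int))) = adj0 at hinit
  induction roads generalizing adj0 with
  | nil => exact hinit
  | cons r rest ih =>
    rw [List.foldl_cons]
    obtain ⟨hrl, hr0, hr1⟩ := hr r List.mem_cons_self
    obtain ⟨hlen0, hval0, hsym0⟩ := hinit
    have ha : PySem.List.pyGetD r 0 0 = r.getD 0 0 := PySem.List.pyGetD_zero r 0
    have hb : PySem.List.pyGetD r 1 0 = r.getD 1 0 := by
      rw [show (1 : Int) = ((1 : Nat) : Int) by norm_num, PySem.List.pyGetD_natCast]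
    obtain ⟨ca, hca, hcam⟩ := pyIdx_some_of_inRange hr0
    obtain ⟨cb, hcb, hcbm⟩ := pyIdx_some_of_inRange hr1
    rw [← ha] at hca
    rw [← hb] at hcb
    obtain ⟨hlenS, hmemS⟩ := step_row_mem n.toNat adj0 hlen0
      (PySem.List.pyGetD r 0 0 - 1) (PySem.List.pyGetD r 1 0 - 1) ca cb hca hcb
    apply ih (fun r hr' => hr r (List.mem_cons_of_mem _ hr'))
    refine ⟨hlenS, ?_, ?_⟩
    · intro c x hx
      rcases (hmemS c x).mp hx with h | ⟨_, h⟩ | ⟨_, h⟩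
      · exact hval0 c x h
      · subst h; rw [hb]; exact hr1
      · subst h; rw [ha]; exact hr0
    · intro c1 c2 hrel
      obtain ⟨x, hx, hxc⟩ := hrel
      rcases (hmemS c1 x).mp hx with h | ⟨hc1, h⟩ | ⟨hc1, h⟩
      · obtain ⟨y, hy, hyc⟩ := hsym0 c1 c2 ⟨x, h, hxc⟩
        exact ⟨y, (hmemS c2 y).mpr (Or.inl hy), hyc⟩
      · subst h
        have : cb = c2 := Option.some_injective _ (hcb.symm.trans hxc)
        subst this hc1
        exact ⟨PySem.List.pyGetD r 0 0 - 1,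
          (hmemS cb _).mpr (Or.inr (Or.inr ⟨rfl, rfl⟩)), hca⟩
      · subst h
        have : ca = c2 := Option.some_injective _ (hca.symm.trans hxc)
        subst this hc1
        exact ⟨PySem.List.pyGetD r 1 0 - 1,
          (hmemS ca _).mpr (Or.inr (Or.inl ⟨rfl, rfl⟩)), hcb⟩

-- ---- invariant of the level-BFS state, used to bridge to B's sweeps ----
def TouchedF (m : Nat) (adj : List (List Int)) (F : List Int) (c : Nat) : Prop :=
  ∃ q ∈ F, ∃ cq, PySem.List.pyIdx? m q = some cq ∧
    ∃ x ∈ adj.getD cq [], PySem.List.pyIdx? m x = some c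

def InvB (m : Nat) (adj : List (List Int)) (dist : List Int) (F : List Int) (level : Nat) : Prop :=
  dist.length = m ∧
  (∀ c, c < m → dist.getD c 0 = -1 ∨ (0 ≤ dist.getD c 0 ∧ dist.getD c 0 ≤ (level : Int))) ∧
  (∀ q ∈ F, ∃ c, PySem.List.pyIdx? m q = some c ∧ dist.getD c 0 = (level : Int)) ∧
  (∀ c, c < m → dist.getD c 0 = (level : Int) → ∃ q ∈ F, PySem.List.pyIdx? m q = some c) ∧
  (∀ c, c < m → 0 ≤ dist.getD c 0 → dist.getD c 0 < (level : Int) →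
    ∀ x ∈ adj.getD c [], ∀ cx, PySem.List.pyIdx? m x = some cx → dist.getD cx 0 ≠ -1)

-- pointwise description of the inner fold of one frontier node's row
lemma innerB_char (m : Nat) (level : Nat) (dist0 : List Int) :
    ∀ (route : List Int) (dist nx : List Int),
      dist.length = m →
      (∀ c, c < m → dist.getD c 0 = dist0.getD c 0 ∨
          (dist0.getD c 0 = -1 ∧ dist.getD c 0 = (level : Int) + 1)) →
      (∀ q ∈ nx, ∃ c, PySem.List.pyIdx? m q = some c ∧ c < m ∧
          dist.getD c 0 = (level : Int) + 1 ∧ dist0.getD c 0 = -1) →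
      (∀ c, c < m → dist.getD c 0 ≠ dist0.getD c 0 → ∃ q ∈ nx, PySem.List.pyIdx? m q = some c) →
      (route.foldl (levelStepInner level) (dist, nx)).1.length = m ∧
      (∀ c, c < m →
        (route.foldl (levelStepInner level) (dist, nx)).1.getD c 0
          = if dist.getD c 0 = -1 ∧ ∃ x ∈ route, PySem.List.pyIdx? m x = some c
            then (level : Int) + 1 else dist.getD c 0) ∧
      (∀ q ∈ (route.foldl (levelStepInner level) (dist, nx)).2, ∃ c,
          PySem.List.pyIdx? m q = some c ∧ c < m ∧
          (route.foldl (levelStepInner level) (dist, nx)).1.getD c 0 = (level : Int) + 1 ∧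
          dist0.getD c 0 = -1) ∧
      (∀ c, c < m → (route.foldl (levelStepInner level) (dist, nx)).1.getD c 0 ≠ dist0.getD c 0 →
          ∃ q ∈ (route.foldl (levelStepInner level) (dist, nx)).2, PySem.List.pyIdx? m q = some c) := by
  intro route
  induction route with
  | nil =>
    intro dist nx hlen hcur hnx hchg
    refine ⟨hlen, ?_, hnx, hchg⟩
    intro c hc
    rw [if_neg (by rintro ⟨-, x, hx, -⟩; cases hx)]
    rfl
  | cons x rest ih =>
    intro dist nx hlen hcur hnx hchg
    rw [List.foldl_cons]
    by_cases hw : PySem.List.pyGetD dist x 0 = -1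
    · -- write: dist[x] := level + 1, nx := nx ++ [x]
      obtain ⟨cx, hcx, hcxlt, hxval⟩ := read_neg_one hw
      rw [hlen] at hcx
      have hset : PySem.List.pySetD dist x ((level : Int) + 1)
          = dist.set cx ((level : Int) + 1) := pySetD_eq_set _ (by rw [hlen]; exact hcx)
      have hstep : levelStepInner level (dist, nx) x
          = (dist.set cx ((level : Int) + 1), nx ++ [x]) := by
        unfold levelStepInner
        rw [if_pos hw, hset]
      have hcxv : dist.getD cx 0 = -1 := by
        rw [List.getD_eq_getElem?_getD, List.getElem?_eq_getElem hcxlt]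
        simpa using hxval
      have hd0cx : dist0.getD cx 0 = -1 := by
        rcases hcur cx (by omega) with h | ⟨-, h⟩
        · rw [← h]; exact hcxv
        · rw [hcxv] at h; omega
      have hget1 : ∀ c, (dist.set cx ((level : Int) + 1)).getD c 0
          = if c = cx then (level : Int) + 1 else dist.getD c 0 :=
        fun c => getD_set_of dist cx _ c 0 hcxlt
      have hlen1 : (dist.set cx ((level : Int) + 1)).length = m := by
        rw [List.length_set]; exact hlen
      have hcur1 : ∀ c, c < m → (dist.set cx ((level : Int) + 1)).getD c 0 = dist0.getD c 0 ∨
          (dist0.getD c 0 = -1 ∧ (dist.set cx ((level : Int) + 1)).getD c 0 = (level : Int) + 1) := by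
        intro c hc
        rw [hget1 c]
        by_cases hcc : c = cx
        · rw [if_pos hcc, hcc]
          exact Or.inr ⟨hd0cx, rfl⟩
        · rw [if_neg hcc]
          exact hcur c hc
      have hnx1 : ∀ q ∈ nx ++ [x], ∃ c, PySem.List.pyIdx? m q = some c ∧ c < m ∧
          (dist.set cx ((level : Int) + 1)).getD c 0 = (level : Int) + 1 ∧
          dist0.getD c 0 = -1 := by
        intro q hq
        rcases List.mem_append.mp hq with hq | hq
        · obtain ⟨c, h1, h2, h3, h4⟩ := hnx q hq
          refine ⟨c, h1, h2, ?_, h4⟩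
          rw [hget1 c]
          by_cases hcc : c = cx
          · rw [if_pos hcc]
          · rw [if_neg hcc]; exact h3
        · rw [List.mem_singleton.mp hq]
          exact ⟨cx, hcx, hcxlt.trans_eq hlen, by rw [hget1 cx, if_pos rfl], hd0cx⟩
      have hchg1 : ∀ c, c < m → (dist.set cx ((level : Int) + 1)).getD c 0 ≠ dist0.getD c 0 →
          ∃ q ∈ nx ++ [x], PySem.List.pyIdx? m q = some c := by
        intro c hc hne
        rw [hget1 c] at hne
        by_cases hcc : c = cx
        · exact ⟨x, List.mem_append.mpr (Or.inr (List.mem_singleton.mpr rfl)), hcc ▸ hcx⟩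
        · rw [if_neg hcc] at hne
          obtain ⟨q, hq, hqc⟩ := hchg c hc hne
          exact ⟨q, List.mem_append.mpr (Or.inl hq), hqc⟩
      obtain ⟨ih1, ih2, ih3, ih4⟩ := ih (dist.set cx ((level : Int) + 1)) (nx ++ [x])
        hlen1 hcur1 hnx1 hchg1
      rw [hstep]
      refine ⟨ih1, ?_, ih3, ih4⟩
      intro c hc
      rw [ih2 c hc, hget1 c]
      by_cases hcc : c = cx
      · subst hcc
        rw [if_pos rfl, if_neg (by rintro ⟨h, -⟩; omega),
          if_pos ⟨hcxv, x, List.mem_cons_self, hcx⟩]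
      · rw [if_neg hcc]
        by_cases hcond : dist.getD c 0 = -1 ∧ ∃ y ∈ rest, PySem.List.pyIdx? m y = some c
        · rw [if_pos hcond, if_pos ⟨hcond.1, hcond.2.choose,
            List.mem_cons_of_mem _ hcond.2.choose_spec.1, hcond.2.choose_spec.2⟩]
        · rw [if_neg hcond, if_neg ?_]
          rintro ⟨h1, y, hy, hyc⟩
          rcases List.mem_cons.mp hy with rfl | hy
          · exact hcc (Option.some_injective _ (hcx.symm.trans hyc)).symm
          · exact hcond ⟨h1, y, hy, hyc⟩
    · -- no write
      have hstep : levelStepInner level (dist, nx) x = (dist, nx) := by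
        unfold levelStepInner
        rw [if_neg hw]
      obtain ⟨ih1, ih2, ih3, ih4⟩ := ih dist nx hlen hcur hnx hchg
      rw [hstep]
      refine ⟨ih1, ?_, ih3, ih4⟩
      intro c hc
      rw [ih2 c hc]
      by_cases hcond : dist.getD c 0 = -1 ∧ ∃ y ∈ rest, PySem.List.pyIdx? m y = some c
      · rw [if_pos hcond, if_pos ⟨hcond.1, hcond.2.choose,
          List.mem_cons_of_mem _ hcond.2.choose_spec.1, hcond.2.choose_spec.2⟩]
      · rw [if_neg hcond, if_neg ?_]
        rintro ⟨h1, y, hy, hyc⟩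
        rcases List.mem_cons.mp hy with rfl | hy
        · obtain ⟨k, hk, hklt⟩ : ∃ k, PySem.List.pyIdx? dist.length y = some k ∧ k < dist.length := by
            rw [hlen, hyc]
            exact ⟨c, rfl, pyIdx_lt hyc⟩
          have : PySem.List.pyGetD dist y 0 = dist.getD c 0 := by
            rw [pyGetD_cell dist y k 0 hk]
            have : k = c := Option.some_injective _ ((hlen ▸ hk).symm.trans hyc)
            rw [this]
          rw [this, h1] at hw
          exact hw rfl
        · exact hcond ⟨h1, y, hy, hyc⟩

-- helper: how TouchedF decomposes over a cons frontier
lemma touchedF_cons (m : Nat) (adj : List (List Int)) (q : Int) (F : List Int) (c cq : Nat)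
    (hq : PySem.List.pyIdx? m q = some cq) :
    TouchedF m adj (q :: F) c ↔
      (∃ x ∈ adj.getD cq [], PySem.List.pyIdx? m x = some c) ∨ TouchedF m adj F c := by
  constructor
  · rintro ⟨q', hq', cq', hcq', hx⟩
    rcases List.mem_cons.mp hq' with rfl | hq'
    · have : cq = cq' := Option.some_injective _ (hq.symm.trans hcq')
      exact Or.inl (this ▸ hx)
    · exact Or.inr ⟨q', hq', cq', hcq', hx⟩
  · rintro (hx | ⟨q', hq', cq', hcq', hx⟩)
    · exact ⟨q, List.mem_cons_self, cq, hq, hx⟩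
    · exact ⟨q', List.mem_cons_of_mem _ hq', cq', hcq', hx⟩

-- pointwise description of one level-BFS round (fold of levelStep over the frontier)
lemma outerB_char (m : Nat) (adj : List (List Int)) (level : Nat) (dist0 : List Int)
    (hadjlen : adj.length = m) :
    ∀ (F : List Int) (dist nx : List Int),
      dist.length = m →
      (∀ q ∈ F, ∃ cq, PySem.List.pyIdx? m q = some cq) →
      (∀ c, c < m → dist.getD c 0 = dist0.getD c 0 ∨
          (dist0.getD c 0 = -1 ∧ dist.getD c 0 = (level : Int) + 1)) →
      (∀ q ∈ nx, ∃ c, PySem.List.pyIdx? m q = some c ∧ c < m ∧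
          dist.getD c 0 = (level : Int) + 1 ∧ dist0.getD c 0 = -1) →
      (∀ c, c < m → dist.getD c 0 ≠ dist0.getD c 0 → ∃ q ∈ nx, PySem.List.pyIdx? m q = some c) →
      (F.foldl (levelStep adj level) (dist, nx)).1.length = m ∧
      (∀ c, c < m →
        ((dist.getD c 0 = -1 ∧ TouchedF m adj F c →
           (F.foldl (levelStep adj level) (dist, nx)).1.getD c 0 = (level : Int) + 1) ∧
         (¬ (dist.getD c 0 = -1 ∧ TouchedF m adj F c) →
           (F.foldl (levelStep adj level) (dist, nx)).1.getD c 0 = dist.getD c 0))) ∧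
      (∀ q ∈ (F.foldl (levelStep adj level) (dist, nx)).2, ∃ c,
          PySem.List.pyIdx? m q = some c ∧ c < m ∧
          (F.foldl (levelStep adj level) (dist, nx)).1.getD c 0 = (level : Int) + 1 ∧
          dist0.getD c 0 = -1) ∧
      (∀ c, c < m → (F.foldl (levelStep adj level) (dist, nx)).1.getD c 0 ≠ dist0.getD c 0 →
          ∃ q ∈ (F.foldl (levelStep adj level) (dist, nx)).2, PySem.List.pyIdx? m q = some c) := by
  intro F
  induction F with
  | nil =>
    intro dist nx hlen _ hcur hnx hchg
    refine ⟨hlen, ?_, hnx, hchg⟩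
    intro c hc
    refine ⟨?_, fun _ => rfl⟩
    rintro ⟨-, q, hq, -⟩
    cases hq
  | cons q F' ih =>
    intro dist nx hlen hF hcur hnx hchg
    obtain ⟨cq, hcq⟩ := hF q List.mem_cons_self
    have hrow : PySem.List.pyGetD adj q [] = adj.getD cq [] :=
      pyGetD_cell adj q cq [] (by rw [hadjlen]; exact hcq)
    rw [List.foldl_cons]
    have hstep : levelStep adj level (dist, nx) q
        = (adj.getD cq []).foldl (levelStepInner level) (dist, nx) := by
      unfold levelStep
      rw [hrow]
    obtain ⟨in1, in2, in3, in4⟩ := innerB_char m level dist0 (adj.getD cq [])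
      dist nx hlen hcur hnx hchg
    set dist1 := ((adj.getD cq []).foldl (levelStepInner level) (dist, nx)).1 with hdist1
    set nx1 := ((adj.getD cq []).foldl (levelStepInner level) (dist, nx)).2 with hnx1
    have hcur1 : ∀ c, c < m → dist1.getD c 0 = dist0.getD c 0 ∨
        (dist0.getD c 0 = -1 ∧ dist1.getD c 0 = (level : Int) + 1) := by
      intro c hc
      rw [in2 c hc]
      by_cases hcond : dist.getD c 0 = -1 ∧ ∃ x ∈ adj.getD cq [], PySem.List.pyIdx? m x = some c
      · rw [if_pos hcond]
        rcases hcur c hc with h | ⟨h, -⟩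
        · exact Or.inr ⟨by rw [← h]; exact hcond.1, rfl⟩
        · exact Or.inr ⟨h, rfl⟩
      · rw [if_neg hcond]
        exact hcur c hc
    obtain ⟨out1, out2, out3, out4⟩ := ih dist1 nx1 in1
      (fun q' hq' => hF q' (List.mem_cons_of_mem _ hq')) hcur1 in3 in4
    rw [hstep]
    refine ⟨out1, ?_, out3, out4⟩
    intro c hc
    have hin2 := in2 c hc
    have htch := touchedF_cons m adj q F' c cq hcq
    constructor
    · rintro ⟨hunset, htouch⟩
      rcases htch.mp htouch with hx | hx
      · have hd1 : dist1.getD c 0 = (level : Int) + 1 := by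
          rw [hin2, if_pos ⟨hunset, hx⟩]
        rw [(out2 c hc).2 (by rw [hd1]; rintro ⟨h, -⟩; omega), hd1]
      · by_cases hcond : dist.getD c 0 = -1 ∧ ∃ x ∈ adj.getD cq [], PySem.List.pyIdx? m x = some c
        · have hd1 : dist1.getD c 0 = (level : Int) + 1 := by rw [hin2, if_pos hcond]
          rw [(out2 c hc).2 (by rw [hd1]; rintro ⟨h, -⟩; omega), hd1]
        · have hd1 : dist1.getD c 0 = dist.getD c 0 := by rw [hin2, if_neg hcond]
          exact (out2 c hc).1 ⟨by rw [hd1]; exact hunset, hx⟩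
    · intro hneg
      by_cases hunset : dist.getD c 0 = -1
      · have hnotouch : ¬ TouchedF m adj (q :: F') c := fun h => hneg ⟨hunset, h⟩
        have hnorow : ¬ ∃ x ∈ adj.getD cq [], PySem.List.pyIdx? m x = some c :=
          fun h => hnotouch (htch.mpr (Or.inl h))
        have hd1 : dist1.getD c 0 = dist.getD c 0 := by
          rw [hin2, if_neg (by rintro ⟨-, h⟩; exact hnorow h)]
        rw [(out2 c hc).2 ?_, hd1]
        rintro ⟨-, h⟩
        exact hnotouch (htch.mpr (Or.inr h))
      · have hd1 : dist1.getD c 0 = dist.getD c 0 := by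
          rw [hin2, if_neg (by rintro ⟨h, -⟩; exact hunset h)]
        rw [(out2 c hc).2 (by rw [hd1]; rintro ⟨h, -⟩; exact hunset h), hd1]

-- every already-set neighbour of a still-unset cell carries exactly the current level
lemma neighbor_set_eq_level (m : Nat) (adj : List (List Int)) (dist : List Int) (F : List Int)
    (level : Nat) (hadj : AdjInv m adj) (hinv : InvB m adj dist F level)
    (c : Nat) (_hc : c < m) (hunset : dist.getD c 0 = -1)
    (x : Int) (hx : x ∈ adj.getD c []) (cx : Nat) (hcx : PySem.List.pyIdx? m x = some cx)
    (hset : dist.getD cx 0 ≠ -1) : dist.getD cx 0 = (level : Int) := by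
  obtain ⟨hlenA, hvals, hsym⟩ := hadj
  obtain ⟨hlenD, hbnd, hc1, hc2, hcl⟩ := hinv
  have hcxm : cx < m := pyIdx_lt hcx
  have hb := hbnd cx hcxm
  rcases hb with hb | ⟨hb1, hb2⟩
  · exact absurd hb hset
  rcases lt_or_eq_of_le hb2 with hlt | heq
  · exfalso
    obtain ⟨y, hy, hyc⟩ := hsym c cx ⟨x, hx, hcx⟩
    exact hcl cx hcxm hb1 hlt y hy c hyc hunset
  · exact heq

-- value of B's inner min-loop when every set value it can see equals L
lemma bestOf_const (dist : List Int) (row : List Int) (L : Int) (hL : L ≠ -1)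
    (h : ∀ x ∈ row, PySem.List.pyGetD dist x 0 ≠ -1 → PySem.List.pyGetD dist x 0 = L) :
    bestOf dist row = if ∃ x ∈ row, PySem.List.pyGetD dist x 0 ≠ -1 then L else -1 := by
  suffices haux : ∀ (row' : List Int) (best : Int),
      (∀ x ∈ row', PySem.List.pyGetD dist x 0 ≠ -1 → PySem.List.pyGetD dist x 0 = L) →
      (best = -1 ∨ best = L) →
      row'.foldl (fun best u =>
        if PySem.List.pyGetD dist u 0 ≠ -1 ∧ (best = -1 ∨ PySem.List.pyGetD dist u 0 < best)
        then PySem.List.pyGetD dist u 0 else best) best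
        = if best = L ∨ ∃ x ∈ row', PySem.List.pyGetD dist x 0 ≠ -1 then L else -1 by
    unfold bestOf
    rw [haux row (-1) h (Or.inl rfl)]
    by_cases hex : ∃ x ∈ row, PySem.List.pyGetD dist x 0 ≠ -1
    · rw [if_pos (Or.inr hex), if_pos hex]
    · rw [if_neg ?_, if_neg hex]
      rintro (h1 | h1)
      · exact hL h1.symm
      · exact hex h1
  intro row'
  induction row' with
  | nil =>
    intro best hrow hbest
    simp only [List.foldl_nil]
    rcases hbest with rfl | rfl
    · rw [if_neg ?_]
      rintro (h1 | h1)
      · exact hL h1.symm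
      · obtain ⟨x, hx, -⟩ := h1; cases hx
    · rw [if_pos (Or.inl rfl)]
  | cons u rest ih =>
    intro best hrow hbest
    rw [List.foldl_cons]
    by_cases hu : PySem.List.pyGetD dist u 0 ≠ -1
    · have huL : PySem.List.pyGetD dist u 0 = L := hrow u List.mem_cons_self hu
      have hstep : (if PySem.List.pyGetD dist u 0 ≠ -1 ∧
            (best = -1 ∨ PySem.List.pyGetD dist u 0 < best)
          then PySem.List.pyGetD dist u 0 else best) = L := by
        rcases hbest with rfl | rfl
        · rw [if_pos ⟨hu, Or.inl rfl⟩, huL]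
        · rw [if_neg ?_]
          rintro ⟨-, h1 | h1⟩
          · exact hL h1
          · rw [huL] at h1; omega
      rw [hstep, ih L (fun x hx => hrow x (List.mem_cons_of_mem _ hx)) (Or.inr rfl),
        if_pos (Or.inl rfl), if_pos (Or.inr ⟨u, List.mem_cons_self, hu⟩)]
    · have hstep : (if PySem.List.pyGetD dist u 0 ≠ -1 ∧
            (best = -1 ∨ PySem.List.pyGetD dist u 0 < best)
          then PySem.List.pyGetD dist u 0 else best) = best := by
        rw [if_neg (by rintro ⟨h1, -⟩; exact hu h1)]
      rw [hstep, ih best (fun x hx => hrow x (List.mem_cons_of_mem _ hx)) hbest]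
      by_cases hcond : best = L ∨ ∃ x ∈ rest, PySem.List.pyGetD dist x 0 ≠ -1
      · rw [if_pos hcond, if_pos ?_]
        rcases hcond with h1 | ⟨x, hx, h1⟩
        · exact Or.inl h1
        · exact Or.inr ⟨x, List.mem_cons_of_mem _ hx, h1⟩
      · rw [if_neg hcond, if_neg ?_]
        rintro (h1 | ⟨x, hx, h1⟩)
        · exact hcond (Or.inl h1)
        · rcases List.mem_cons.mp hx with rfl | hx
          · exact hu h1
          · exact hcond (Or.inr ⟨x, hx, h1⟩)

-- one level-BFS round produces exactly one Jacobi sweep of B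
lemma round_eq_sweep (n : Int) (m : Nat) (hm : m = n.toNat) (adj : List (List Int))
    (hadj : AdjInv m adj) (dist : List Int) (F : List Int) (level : Nat)
    (hinv : InvB m adj dist F level) :
    sweepOnce adj n dist = (F.foldl (levelStep adj level) (dist, [])).1 := by
  obtain ⟨hlenA, hvals, hsym⟩ := hadj
  obtain ⟨hlenD, hbnd, hc1, hc2, hcl⟩ := hinv
  obtain ⟨out1, out2, -, -⟩ := outerB_char m adj level dist hlenA F dist []
    hlenD (fun q hq => ⟨(hc1 q hq).choose, (hc1 q hq).choose_spec.1⟩)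
    (fun c _ => Or.inl rfl) (fun q hq => absurd hq (List.not_mem_nil))
    (fun c _ hne => absurd rfl hne)
  have hlenS : (sweepOnce adj n dist).length = m := by
    rw [length_sweepOnce, PySem.List.length_pyRange_one]
    omega
  apply List.ext_getElem (by omega)
  intro k hk1 hk2
  have hkm : k < m := by omega
  have hgetS : (sweepOnce adj n dist)[k] = newCell adj dist (k : Int) := by
    have := sweepOnce_eq_map adj n dist
    rw [List.getElem_of_eq this, List.getElem_map, PySem.List.getElem_pyRange_one, zero_add]
  have hRHS : (F.foldl (levelStep adj level) (dist, [])).1[k]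
      = (F.foldl (levelStep adj level) (dist, [])).1.getD k 0 := by
    rw [List.getD_eq_getElem?_getD, List.getElem?_eq_getElem hk2]
    rfl
  rw [hgetS, hRHS]
  unfold newCell
  rw [PySem.List.pyGetD_natCast, PySem.List.pyGetD_natCast]
  -- set neighbours of an unset cell carry exactly level, and exist iff the cell is touched
  have hresolve : ∀ x ∈ adj.getD k [], ∃ cx, PySem.List.pyIdx? m x = some cx ∧
      PySem.List.pyGetD dist x 0 = dist.getD cx 0 := by
    intro x hx
    obtain ⟨cx, hcx, -⟩ := pyIdx_some_of_inRange (hvals k x hx)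
    exact ⟨cx, hcx, pyGetD_cell dist x cx 0 (by rw [hlenD]; exact hcx)⟩
  by_cases hset : dist.getD k 0 = -1
  · rw [if_neg (not_not_intro hset)]
    have hiff : (∃ x ∈ adj.getD k [], PySem.List.pyGetD dist x 0 ≠ -1) ↔ TouchedF m adj F k := by
      constructor
      · rintro ⟨x, hx, hxne⟩
        obtain ⟨cx, hcx, hxv⟩ := hresolve x hx
        rw [hxv] at hxne
        have hlev := neighbor_set_eq_level m adj dist F level ⟨hlenA, hvals, hsym⟩
          ⟨hlenD, hbnd, hc1, hc2, hcl⟩ k hkm hset x hx cx hcx hxne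
        obtain ⟨q, hq, hqc⟩ := hc2 cx (pyIdx_lt hcx) hlev
        obtain ⟨y, hy, hyc⟩ := hsym k cx ⟨x, hx, hcx⟩
        exact ⟨q, hq, cx, hqc, y, hy, hyc⟩
      · rintro ⟨q, hq, cq, hcq, x, hx, hxc⟩
        obtain ⟨y, hy, hyc⟩ := hsym cq k ⟨x, hx, hxc⟩
        obtain ⟨c', hc', hcv⟩ := hc1 q hq
        have hccq : c' = cq := Option.some_injective _ (hc'.symm.trans hcq)
        obtain ⟨cy, hcy, hyv⟩ := hresolve y hy
        have hcycq : cy = cq := Option.some_injective _ (hcy.symm.trans hyc)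
        refine ⟨y, hy, ?_⟩
        rw [hyv, hcycq, ← hccq, hcv]
        omega
    by_cases htch : TouchedF m adj F k
    · have hbest : bestOf dist (adj.getD k []) = (level : Int) := by
        rw [bestOf_const dist (adj.getD k []) (level : Int) (by omega) ?_,
          if_pos (hiff.mpr htch)]
        intro x hx hxne
        obtain ⟨cx, hcx, hxv⟩ := hresolve x hx
        rw [hxv] at hxne ⊢
        exact neighbor_set_eq_level m adj dist F level ⟨hlenA, hvals, hsym⟩
          ⟨hlenD, hbnd, hc1, hc2, hcl⟩ k hkm hset x hx cx hcx hxne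
      rw [hbest, if_pos (by omega), (out2 k hkm).1 ⟨hset, htch⟩]
    · have hbest : bestOf dist (adj.getD k []) = -1 := by
        rw [bestOf_const dist (adj.getD k []) (level : Int) (by omega) ?_,
          if_neg (fun h => htch (hiff.mp h))]
        intro x hx hxne
        obtain ⟨cx, hcx, hxv⟩ := hresolve x hx
        rw [hxv] at hxne ⊢
        exact neighbor_set_eq_level m adj dist F level ⟨hlenA, hvals, hsym⟩
          ⟨hlenD, hbnd, hc1, hc2, hcl⟩ k hkm hset x hx cx hcx hxne
      rw [hbest, if_neg (by omega), (out2 k hkm).2 (by rintro ⟨-, h⟩; exact htch h), hset]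
  · rw [if_pos hset, (out2 k hkm).2 (by rintro ⟨h, -⟩; exact hset h)]

-- the level-BFS invariant survives one round
lemma invB_step (n : Int) (m : Nat) (_hm : m = n.toNat) (adj : List (List Int))
    (hadj : AdjInv m adj) (dist : List Int) (F : List Int) (level : Nat)
    (hinv : InvB m adj dist F level) :
    InvB m adj (F.foldl (levelStep adj level) (dist, [])).1
      (F.foldl (levelStep adj level) (dist, [])).2 (level + 1) := by
  obtain ⟨hlenA, hvals, hsym⟩ := hadj
  obtain ⟨hlenD, hbnd, hc1, hc2, hcl⟩ := hinv
  obtain ⟨out1, out2, out3, out4⟩ := outerB_char m adj level dist hlenA F dist []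
    hlenD (fun q hq => ⟨(hc1 q hq).choose, (hc1 q hq).choose_spec.1⟩)
    (fun c _ => Or.inl rfl) (fun q hq => absurd hq (List.not_mem_nil))
    (fun c _ hne => absurd rfl hne)
  have hcast : (((level + 1 : Nat)) : Int) = (level : Int) + 1 := by push_cast; ring
  refine ⟨out1, ?_, ?_, ?_, ?_⟩
  · intro c hc
    by_cases hcond : dist.getD c 0 = -1 ∧ TouchedF m adj F c
    · rw [(out2 c hc).1 hcond, hcast]
      right
      omega
    · rw [(out2 c hc).2 hcond, hcast]
      rcases hbnd c hc with h | ⟨h1, h2⟩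
      · exact Or.inl h
      · exact Or.inr ⟨h1, by omega⟩
  · intro q hq
    obtain ⟨c, h1, h2, h3, -⟩ := out3 q hq
    exact ⟨c, h1, by rw [hcast]; exact h3⟩
  · intro c hc hval
    rw [hcast] at hval
    apply out4 c hc
    rw [hval]
    rcases hbnd c hc with h | ⟨-, h⟩ <;> omega
  · intro c hc hpos hlt
    rw [hcast] at hlt
    by_cases hcond : dist.getD c 0 = -1 ∧ TouchedF m adj F c
    · rw [(out2 c hc).1 hcond] at hlt
      omega
    · have hval := (out2 c hc).2 hcond
      rw [hval] at hpos hlt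
      intro x hx cx hcx hfneg
      have hcxm : cx < m := pyIdx_lt hcx
      rcases lt_or_eq_of_le (by omega : dist.getD c 0 ≤ (level : Int)) with hlt' | heq
      · -- strictly below level: old closure applies
        have := hcl c hc hpos hlt' x hx cx hcx
        by_cases hcond2 : dist.getD cx 0 = -1 ∧ TouchedF m adj F cx
        · rw [(out2 cx hcxm).1 hcond2] at hfneg
          omega
        · rw [(out2 cx hcxm).2 hcond2] at hfneg
          exact this hfneg
      · -- exactly level: c is a frontier cell, so its unset neighbours were just written
        obtain ⟨q, hq, hqc⟩ := hc2 c hc heq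
        by_cases hunset : dist.getD cx 0 = -1
        · have htch : TouchedF m adj F cx := ⟨q, hq, c, hqc, x, hx, hcx⟩
          rw [(out2 cx hcxm).1 ⟨hunset, htch⟩] at hfneg
          omega
        · by_cases hcond2 : dist.getD cx 0 = -1 ∧ TouchedF m adj F cx
          · exact hunset hcond2.1
          · rw [(out2 cx hcxm).2 hcond2] at hfneg
            exact hunset hfneg

-- with an empty frontier the distance array is a fixpoint of B's sweep
lemma sweep_fixpoint (n : Int) (m : Nat) (hm : m = n.toNat) (adj : List (List Int))
    (hadj : AdjInv m adj) (dist : List Int) (level : Nat)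
    (hinv : InvB m adj dist [] level) :
    sweepOnce adj n dist = dist := by
  obtain ⟨hlenA, hvals, hsym⟩ := hadj
  obtain ⟨hlenD, hbnd, hc1, hc2, hcl⟩ := hinv
  have hlenS : (sweepOnce adj n dist).length = m := by
    rw [length_sweepOnce, PySem.List.length_pyRange_one]
    omega
  apply List.ext_getElem (by omega)
  intro k hk1 hk2
  have hkm : k < m := by omega
  have hgetS : (sweepOnce adj n dist)[k] = newCell adj dist (k : Int) := by
    have := sweepOnce_eq_map adj n dist
    rw [List.getElem_of_eq this, List.getElem_map, PySem.List.getElem_pyRange_one, zero_add]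
  have hRHS : dist[k] = dist.getD k 0 := by
    rw [List.getD_eq_getElem?_getD, List.getElem?_eq_getElem hk2]
    rfl
  rw [hgetS, hRHS]
  unfold newCell
  rw [PySem.List.pyGetD_natCast, PySem.List.pyGetD_natCast]
  by_cases hset : dist.getD k 0 = -1
  · rw [if_neg (not_not_intro hset)]
    have hbest : bestOf dist (adj.getD k []) = -1 := by
      rw [bestOf_const dist (adj.getD k []) (level : Int) (by omega) ?_, if_neg ?_]
      · rintro ⟨x, hx, hxne⟩
        obtain ⟨cx, hcx, -⟩ := pyIdx_some_of_inRange (hvals k x hx)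
        have hxv : PySem.List.pyGetD dist x 0 = dist.getD cx 0 :=
          pyGetD_cell dist x cx 0 (by rw [hlenD]; exact hcx)
        rw [hxv] at hxne
        have hlev := neighbor_set_eq_level m adj dist [] level ⟨hlenA, hvals, hsym⟩
          ⟨hlenD, hbnd, hc1, hc2, hcl⟩ k hkm hset x hx cx hcx hxne
        obtain ⟨q, hq, -⟩ := hc2 cx (pyIdx_lt hcx) hlev
        exact absurd hq (List.not_mem_nil)
      · intro x hx hxne
        obtain ⟨cx, hcx, -⟩ := pyIdx_some_of_inRange (hvals k x hx)
        have hxv : PySem.List.pyGetD dist x 0 = dist.getD cx 0 :=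
          pyGetD_cell dist x cx 0 (by rw [hlenD]; exact hcx)
        rw [hxv] at hxne ⊢
        exact neighbor_set_eq_level m adj dist [] level ⟨hlenA, hvals, hsym⟩
          ⟨hlenD, hbnd, hc1, hc2, hcl⟩ k hkm hset x hx cx hcx hxne
    rw [hbest, if_neg (by omega), hset]
  · rw [if_pos hset]

-- level-BFS = B's fixpoint loop, by induction on the number of unset cells
lemma bfsB_eq_sweepLoop (n : Int) (m : Nat) (hm : m = n.toNat) (adj : List (List Int))
    (hadj : AdjInv m adj) :
    ∀ (N : Nat) (dist F : List Int) (level : Nat), countNeg dist ≤ N →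
      InvB m adj dist F level → bfsB adj F level dist = sweepLoop adj n dist := by
  intro N
  induction N using Nat.strong_induction_on with
  | _ N ih =>
    intro dist F level hcount hinv
    cases F with
    | nil =>
      have hfix := sweep_fixpoint n m hm adj hadj dist level hinv
      rw [sweepLoop]
      simp only [hfix, if_true]
      simp [bfsB]
    | cons q F' =>
      obtain ⟨hlenD, hbnd, hc1, hc2, hcl⟩ := hinv
      obtain ⟨out1, out2, out3, out4⟩ := outerB_char m adj level dist hadj.1 (q :: F')
        dist [] hlenD (fun q' hq' => ⟨(hc1 q' hq').choose, (hc1 q' hq').choose_spec.1⟩)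
        (fun c _ => Or.inl rfl) (fun q' hq' => absurd hq' (List.not_mem_nil))
        (fun c _ hne => absurd rfl hne)
      have hround := round_eq_sweep n m hm adj hadj dist (q :: F') level
        ⟨hlenD, hbnd, hc1, hc2, hcl⟩
      have hinv' := invB_step n m hm adj hadj dist (q :: F') level
        ⟨hlenD, hbnd, hc1, hc2, hcl⟩
      have hstep := bfsB_eq_rest adj (q :: F') level dist
      have hP1d : ((q :: F').foldl (levelStep adj level) (dist, [])).2 = [] →
          ((q :: F').foldl (levelStep adj level) (dist, [])).1 = dist := by
        intro h2
        apply List.ext_getElem (by omega)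
        intro k hk1 hk2
        have hgd1 : ((q :: F').foldl (levelStep adj level) (dist, [])).1[k]
            = ((q :: F').foldl (levelStep adj level) (dist, [])).1.getD k 0 := by
          rw [List.getD_eq_getElem?_getD, List.getElem?_eq_getElem hk1]
          rfl
        have hgd2 : dist[k] = dist.getD k 0 := by
          rw [List.getD_eq_getElem?_getD, List.getElem?_eq_getElem hk2]
          rfl
        rw [hgd1, hgd2]
        by_contra hne
        obtain ⟨q', hq', -⟩ := out4 k (by omega) hne
        rw [h2] at hq'
        exact absurd hq' (List.not_mem_nil)
      by_cases hPd : ((q :: F').foldl (levelStep adj level) (dist, [])).1 = dist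
      · have hP2 : ((q :: F').foldl (levelStep adj level) (dist, [])).2 = [] := by
          cases hp : ((q :: F').foldl (levelStep adj level) (dist, [])).2 with
          | nil => rfl
          | cons z zs =>
            exfalso
            obtain ⟨c, -, -, h3, h4⟩ := out3 z (by rw [hp]; exact List.mem_cons_self)
            rw [hPd] at h3
            rw [h3] at h4
            omega
        rw [hstep, hP2, hPd]
        rw [sweepLoop]
        simp only [hround, hPd, if_true]
        simp [bfsB]
      · have hP2ne : ((q :: F').foldl (levelStep adj level) (dist, [])).2 ≠ [] :=
          fun h => hPd (hP1d h)
        have hcnt := countNeg_levelStep_foldl (q :: F') adj level (dist, [])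
        simp only [List.length_nil, Nat.add_zero] at hcnt
        have hlt : countNeg ((q :: F').foldl (levelStep adj level) (dist, [])).1
            < countNeg dist := by
          cases hp : ((q :: F').foldl (levelStep adj level) (dist, [])).2 with
          | nil => exact absurd hp hP2ne
          | cons z zs =>
            rw [hp] at hcnt
            simp only [List.length_cons] at hcnt
            omega
        rw [hstep, ih (countNeg ((q :: F').foldl (levelStep adj level) (dist, [])).1)
          (by omega) _ _ (level + 1) le_rfl hinv']
        conv_rhs => rw [sweepLoop]
        simp only [hround, if_neg hPd]

-- ===== VERDICT (by name: the statement is the Claim_ definition above) =====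
theorem solution_spec : Claim_equal_solution := by
  intro n roads sources destination hdom hpre
  obtain ⟨hn, hroads, hdest, hsrc⟩ := hpre
  simp only [Spec_solution, solution, solution_alt]
  have hlen : (initDist n).length = n.toNat := initDist_length n
  have hall : ∀ x ∈ initDist n, x = -1 := by
    intro x hx
    simp only [initDist, List.mem_map] at hx
    obtain ⟨_, _, hx⟩ := hx
    omega
  have hread0 : PySem.List.pyGetD (initDist n) (destination - 1) 0 = -1 := by
    obtain ⟨k, hk, hklt⟩ := pyIdx_some_of_inRange (hlen ▸ hdest)
    unfold PySem.List.pyGetD PySem.List.pyGet?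
    rw [hk]
    simp only [Option.bind_some]
    rw [List.getElem?_eq_getElem hklt]
    exact hall _ (List.getElem_mem hklt)
  have hc0 : ∀ x ∈ PySem.List.pySetD (initDist n) (destination - 1) 0, -1 ≤ x := by
    intro x hx
    rcases mem_pySetD hx with hx | hx
    · rw [hall x hx]
    · omega
  have hcount0 := countNeg_pySetD (initDist n) (destination - 1) 0 hread0 (by omega)
  have hle : countNeg (initDist n) ≤ n.toNat := by
    rw [← hlen]; exact List.countP_le_length
  have hb := bridge (mkAdj n roads) (n.toNat + 1) [destination - 1] []
    (PySem.List.pySetD (initDist n) (destination - 1) 0) 0 hc0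
    (fun q hq => by
      rw [List.mem_singleton.mp hq]
      simpa using pyGetD_pySetD_self 0 0 hread0)
    (fun q hq => by cases hq)
    (by
      simp only [List.length_cons, List.length_nil]
      omega)
  simp only [List.append_nil] at hb
  rw [hb, ← bfsB_eq_rest]
  have hinit_getD : ∀ c, c < n.toNat → (initDist n).getD c 0 = -1 := by
    intro c hc
    rw [List.getD_eq_getElem?_getD, List.getElem?_eq_getElem (by omega)]
    exact hall _ (List.getElem_mem (by omega))
  obtain ⟨cd, hcd, hcdm⟩ := pyIdx_some_of_inRange hdest
  have hset0 : PySem.List.pySetD (initDist n) (destination - 1) 0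
      = (initDist n).set cd 0 := pySetD_eq_set _ (by rw [hlen]; exact hcd)
  have hget0 : ∀ c, (PySem.List.pySetD (initDist n) (destination - 1) 0).getD c 0
      = if c = cd then 0 else (initDist n).getD c 0 := by
    intro c
    rw [hset0]
    exact getD_set_of _ cd 0 c 0 (by omega)
  have hinv0 : InvB n.toNat (mkAdj n roads)
      (PySem.List.pySetD (initDist n) (destination - 1) 0) [destination - 1] 0 := by
    refine ⟨?_, ?_, ?_, ?_, ?_⟩
    · rw [hset0, List.length_set, hlen]
    · intro c hc
      rw [hget0 c]
      by_cases hcc : c = cd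
      · rw [if_pos hcc]
        right
        norm_num
      · rw [if_neg hcc, hinit_getD c hc]
        left
        rfl
    · intro q hq
      rw [List.mem_singleton.mp hq]
      refine ⟨cd, hcd, ?_⟩
      rw [hget0 cd, if_pos rfl]
      norm_num
    · intro c hc hval
      rw [hget0 c] at hval
      by_cases hcc : c = cd
      · exact ⟨destination - 1, List.mem_singleton.mpr rfl, hcc ▸ hcd⟩
      · rw [if_neg hcc, hinit_getD c hc] at hval
        omega
    · intro c hc hpos hlt
      omega
  rw [bfsB_eq_sweepLoop n n.toNat rfl (mkAdj n roads) (mkAdj_inv n roads hn hroads)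
    (countNeg (PySem.List.pySetD (initDist n) (destination - 1) 0)) _ _ 0 le_rfl hinv0]
  rw [PySem.List.foldl_append_singleton_eq_map
    (fun s => PySem.List.pyGetD
      (sweepLoop (mkAdj n roads) n
        (PySem.List.pySetD (initDist n) (destination - 1) 0)) (s - 1) 0) sources []]
  simp
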